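-- pv_equiv track=rewrite | github.com/mikewarot/Bitgrid_python | bitgrid/lut_logic.py | _select_implicants_cover
-- ===== SOURCE A (Python) =====
-- from typing import Iterable, Tuple, Dict, Set, List
--
-- def _select_implicants_cover(primes: Dict[str, Set[int]], minterms: Set[int]) -> List[str]:
--     # Prime implicant chart: map minterm -> set of implicant patterns
--     chart: Dict[int, Set[str]] = {m: set() for m in minterms}
--     for p, cov in primes.items():
--         for m in cov:
--             if m in chart:
--                 chart[m].add(p)
--
--     selected: List[str] = []
--     covered: Set[int] = set()
--
--     # 1) Select essential implicants (cover minterms that appear in only one implicant)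
--     while True:
--         essentials = [m for m, ps in chart.items() if m not in covered and len(ps) == 1]
--         if not essentials:
--             break
--         for m in essentials:
--             p = next(iter(chart[m]))
--             if p not in selected:
--                 selected.append(p)
--             # Mark all minterms covered by this implicant
--             for mm in primes[p]:
--                 covered.add(mm)
--
--     # 2) Greedy cover remaining minterms
--     while covered != minterms:
--         # Pick implicant covering the most uncovered minterms
--         best_p = None
--         best_gain = -1
--         for p, cov in primes.items():
--             if p in selected:
--                 continue
--             gain = len([m for m in cov if m not in covered])
--             if gain > best_gain:
--                 best_gain = gain
--                 best_p = p
--         if best_p is None or best_gain <= 0: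
--             break
--         selected.append(best_p)
--         for m in primes[best_p]:
--             covered.add(m)
--
--     return selected
-- ===== SOURCE B (Python) =====
-- def _select_implicants_cover(primes, minterms):
--     # One pass to count, per minterm, how many implicants cover it (and remember
--     # the unique one via last-writer), instead of A's chart-of-sets + re-scanned
--     # while-loop; then greedy selection with incrementally maintained per-prime
--     # uncovered counts instead of recomputing every gain on every round.
--     cnt = {}
--     owner = {}
--     for p, cov in primes.items():
--         for m in cov:
--             if m in minterms:
--                 cnt[m] = cnt.get(m, 0) + 1
--                 owner[m] = p
--     selected = []
--     selset = set()
--     covered = set()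
--     # essential implicants: single pass (A's second while-iteration never finds more)
--     for m in minterms:
--         if cnt.get(m, 0) == 1:
--             p = owner[m]
--             if p not in selset:
--                 selected.append(p)
--                 selset.add(p)
--             covered.update(primes[p])
--     # per-prime uncovered count + reverse index minterm -> covering primes
--     uncov = {}
--     prime_of = {}
--     for p, cov in primes.items():
--         c = 0
--         for m in cov:
--             if m not in covered:
--                 c += 1
--                 prime_of[m] = prime_of.get(m, []) + [p]
--         uncov[p] = c
--     while covered != minterms:
--         best_p = None
--         best_gain = -1
--         for p, g in uncov.items():
--             if p in selset:
--                 continue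
--             if g > best_gain:
--                 best_gain = g
--                 best_p = p
--         if best_p is None or best_gain <= 0:
--             break
--         selected.append(best_p)
--         selset.add(best_p)
--         for m in primes[best_p]:
--             if m not in covered:
--                 covered.add(m)
--                 for q in prime_of.get(m, []):
--                     uncov[q] -= 1
--     return selected
-- ===== Notes on version B (the rewrite author's own statement) =====
-- stated objective: faster
-- what changed: Essential implicants are found in one counting pass (per-minterm cover count plus last-writer owner) instead of A's chart-of-sets rescanned by a while-loop, and the greedy phase maintains per-prime uncovered counts incrementally through a minterm-to-primes index instead of recomputing every gain from the covered set on every round.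
import Mathlib
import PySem

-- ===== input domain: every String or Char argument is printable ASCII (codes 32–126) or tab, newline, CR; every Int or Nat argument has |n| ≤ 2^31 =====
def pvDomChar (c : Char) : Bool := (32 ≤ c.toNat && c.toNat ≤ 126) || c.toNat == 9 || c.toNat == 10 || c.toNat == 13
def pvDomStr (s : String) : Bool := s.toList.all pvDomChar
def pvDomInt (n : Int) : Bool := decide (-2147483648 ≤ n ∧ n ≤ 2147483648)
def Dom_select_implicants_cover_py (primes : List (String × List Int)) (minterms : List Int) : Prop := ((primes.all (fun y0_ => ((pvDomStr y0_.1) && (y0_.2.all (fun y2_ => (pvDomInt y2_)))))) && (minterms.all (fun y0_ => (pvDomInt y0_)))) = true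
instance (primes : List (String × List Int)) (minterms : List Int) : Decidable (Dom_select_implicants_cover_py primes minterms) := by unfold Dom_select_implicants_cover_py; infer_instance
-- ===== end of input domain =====

-- B replaces A's chart-of-sets + rescanning while-loops by a one-pass count/owner
-- essential phase and a greedy phase with incrementally maintained per-prime
-- uncovered counts (objective: faster; return value only — no argument is mutated).

-- Input conversion shared by both ports: the Python argument is a dict str -> set[int]
-- (assoc list: last value per key wins, first position kept) and a set of minterms.
def pvDictOf (primes : List (String × List Int)) : PySem.Dict String (List Int) :=
  primes.foldl (fun d pc => d.insert pc.1 (PySem.Set.ofList pc.2)) PySem.Dict.empty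

-- ===== PORT A =====
-- gain = len([m for m in cov if m not in covered])
def pvGainA (covered : PySem.Set Int) (cov : List Int) : Int :=
  ((cov.filter (fun m => !(PySem.Set.contains covered m))).length : Int)

-- chart = {m: set() for m in minterms}; then for p, cov: for m in cov: if m in chart: chart[m].add(p)
def pvChartA (primes' : PySem.Dict String (List Int)) (minterms' : PySem.Set Int) :
    PySem.Dict Int (PySem.Set String) :=
  primes'.items.foldl
    (fun ch pc => pc.2.foldl
      (fun ch m => if ch.contains m then ch.modify m [] (fun s => PySem.Set.add s pc.1) else ch) ch)
    (minterms'.foldl (fun ch m => ch.insert m ([] : PySem.Set String)) PySem.Dict.empty)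

-- body of 'for m in essentials': p = next(iter(chart[m])) (chart[m] is a singleton there;
-- headD "" is its total form), append p if new, cover primes[p]
def pvEssStepA (chart : PySem.Dict Int (PySem.Set String)) (primes' : PySem.Dict String (List Int))
    (st : List String × PySem.Set Int) (m : Int) : List String × PySem.Set Int :=
  let p := (chart.getD m []).headD ""
  ((if st.1.contains p then st.1 else st.1 ++ [p]), PySem.Set.update st.2 (primes'.getD p []))

-- the 'while True' essential loop (fuel is an upper bound on its iterations)
def pvEssLoopA (chart : PySem.Dict Int (PySem.Set String)) (primes' : PySem.Dict String (List Int)) :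
    Nat → List String × PySem.Set Int → List String × PySem.Set Int
  | 0, st => st
  | fuel + 1, st =>
    let ess := (chart.items.filter
      (fun mp => !(PySem.Set.contains st.2 mp.1) && mp.2.length == 1)).map (·.1)
    if ess.isEmpty then st
    else pvEssLoopA chart primes' fuel (ess.foldl (pvEssStepA chart primes') st)

-- one scan of primes.items() for the best implicant
def pvBestScanA (items : List (String × List Int)) (selected : List String)
    (covered : PySem.Set Int) : Option String × Int :=
  items.foldl
    (fun st pc =>
      if selected.contains pc.1 then st
      else
        let gain := pvGainA covered pc.2
        if gain > st.2 then (some pc.1, gain) else st)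
    (none, -1)

-- 'while covered != minterms' greedy loop (fuel bounds its iterations)
def pvGreedyA (primes' : PySem.Dict String (List Int)) (minterms' : PySem.Set Int) :
    Nat → List String × PySem.Set Int → List String
  | 0, st => st.1
  | fuel + 1, st =>
    if PySem.Set.equal st.2 minterms' then st.1
    else
      let b := pvBestScanA primes'.items st.1 st.2
      match b.1 with
      | none => st.1
      | some p =>
        if b.2 ≤ 0 then st.1
        else pvGreedyA primes' minterms' fuel
          (st.1 ++ [p], PySem.Set.update st.2 (primes'.getD p []))

def select_implicants_cover_py (primes : List (String × List Int)) (minterms : List Int) :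
    List String :=
  let primes' := pvDictOf primes
  let minterms' := PySem.Set.ofList minterms
  let chart := pvChartA primes' minterms'
  let st := pvEssLoopA chart primes' (minterms'.length + 2) ([], [])
  pvGreedyA primes' minterms' (primes'.items.length + 1) st

-- ===== PORT B =====
-- cnt[m] = cnt.get(m,0)+1 and owner[m] = p for every m in cov ∩ minterms
def pvCntOwnerB (primes' : PySem.Dict String (List Int)) (minterms' : PySem.Set Int) :
    PySem.Dict Int Int × PySem.Dict Int String :=
  primes'.items.foldl
    (fun co pc => pc.2.foldl
      (fun co m =>
        if PySem.Set.contains minterms' m then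
          (co.1.insert m (co.1.getD m 0 + 1), co.2.insert m pc.1)
        else co) co)
    (PySem.Dict.empty, PySem.Dict.empty)

-- single essential pass: state (selected, selset, covered)
def pvEssB (primes' : PySem.Dict String (List Int)) (minterms' : PySem.Set Int)
    (cnt : PySem.Dict Int Int) (owner : PySem.Dict Int String) :
    List String × PySem.Set String × PySem.Set Int :=
  minterms'.foldl
    (fun st m =>
      if cnt.getD m 0 == 1 then
        let p := owner.getD m ""
        let sl := if PySem.Set.contains st.2.1 p then (st.1, st.2.1)
                  else (st.1 ++ [p], PySem.Set.add st.2.1 p)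
        (sl.1, sl.2, PySem.Set.update st.2.2 (primes'.getD p []))
      else st)
    ([], [], [])

-- build uncov (per-prime uncovered count) and prime_of (minterm -> covering primes)
def pvIndexB (primes' : PySem.Dict String (List Int)) (covered : PySem.Set Int) :
    PySem.Dict String Int × PySem.Dict Int (List String) :=
  primes'.items.foldl
    (fun up pc =>
      let cpo := pc.2.foldl
        (fun cpo m =>
          if PySem.Set.contains covered m then cpo
          else (cpo.1 + 1, cpo.2.insert m (cpo.2.getD m [] ++ [pc.1])))
        ((0 : Int), up.2)
      (up.1.insert pc.1 cpo.1, cpo.2))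
    (PySem.Dict.empty, PySem.Dict.empty)

-- one scan of uncov.items() (gains are stored, not recomputed)
def pvBestScanB (items : List (String × Int)) (selset : PySem.Set String) : Option String × Int :=
  items.foldl
    (fun st pg =>
      if PySem.Set.contains selset pg.1 then st
      else if pg.2 > st.2 then (some pg.1, pg.2) else st)
    (none, -1)

-- cover the minterms of the chosen implicant, decrementing affected counts
-- (uncov[q] -= 1 ported as modify: q is always a key)
def pvCoverB (primeOf : PySem.Dict Int (List String)) (cov : List Int)
    (st : PySem.Set Int × PySem.Dict String Int) : PySem.Set Int × PySem.Dict String Int :=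
  cov.foldl
    (fun st m =>
      if PySem.Set.contains st.1 m then st
      else (PySem.Set.add st.1 m,
            (primeOf.getD m []).foldl (fun u q => u.modify q 0 (fun g => g - 1)) st.2))
    st

def pvGreedyB (primes' : PySem.Dict String (List Int)) (minterms' : PySem.Set Int)
    (primeOf : PySem.Dict Int (List String)) :
    Nat → List String × PySem.Set String × PySem.Set Int × PySem.Dict String Int → List String
  | 0, st => st.1
  | fuel + 1, st =>
    if PySem.Set.equal st.2.2.1 minterms' then st.1
    else
      let b := pvBestScanB st.2.2.2.items st.2.1
      match b.1 with
      | none => st.1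
      | some p =>
        if b.2 ≤ 0 then st.1
        else
          let cu := pvCoverB primeOf (primes'.getD p []) (st.2.2.1, st.2.2.2)
          pvGreedyB primes' minterms' primeOf fuel
            (st.1 ++ [p], PySem.Set.add st.2.1 p, cu.1, cu.2)

def select_implicants_cover_py_alt (primes : List (String × List Int)) (minterms : List Int) :
    List String :=
  let primes' := pvDictOf primes
  let minterms' := PySem.Set.ofList minterms
  let co := pvCntOwnerB primes' minterms'
  let st := pvEssB primes' minterms' co.1 co.2
  let up := pvIndexB primes' st.2.2
  pvGreedyB primes' minterms' up.2 (primes'.items.length + 1) (st.1, st.2.1, st.2.2, up.1)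

-- ===== PRECONDITION & SPEC =====
def Spec_select_implicants_cover_py (primes : List (String × List Int)) (minterms : List Int) (out : List String) : Prop := out = select_implicants_cover_py_alt primes minterms
instance (primes : List (String × List Int)) (minterms : List Int) (out : List String) : Decidable (Spec_select_implicants_cover_py primes minterms out) := by unfold Spec_select_implicants_cover_py; infer_instance

-- ===== CLAIM (what is proved, stated in full; the proofs are below) =====
def Claim_equal_select_implicants_cover_py : Prop := ∀ (primes : List (String × List Int)) (minterms : List Int), Dom_select_implicants_cover_py primes minterms → Spec_select_implicants_cover_py primes minterms (select_implicants_cover_py primes minterms)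

-- ===== LEMMAS AND PROOFS =====
-- proof-side definitions
def pvCovPrimes (d : PySem.Dict String (List Int)) (m : Int) : List String :=
  (d.items.filter (fun pc => pc.2.contains m)).map (·.1)

def pvCovPrimesL (l : List (String × List Int)) (m : Int) : List String :=
  (l.filter (fun pc => pc.2.contains m)).map (·.1)

lemma pvDictOf_keys_nodup (primes : List (String × List Int)) : (pvDictOf primes).keys.Nodup :=
  PySem.Dict.nodup_keys_foldl_insert_key primes (·.1) (fun _ pc => PySem.Set.ofList pc.2) _ PySem.Dict.nodup_keys_empty

lemma pvDictOf_values_nodup (primes : List (String × List Int)) :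
    ∀ pc ∈ (pvDictOf primes).items, pc.2.Nodup := by
  unfold pvDictOf
  suffices h : ∀ (l : List (String × List Int)) (d : PySem.Dict String (List Int)),
      (∀ pc ∈ d.items, pc.2.Nodup) →
      ∀ pc ∈ (l.foldl (fun d pc => d.insert pc.1 (PySem.Set.ofList pc.2)) d).items, pc.2.Nodup by
    exact h primes PySem.Dict.empty (by simp [PySem.Dict.empty])
  intro l
  induction l with
  | nil => intro d hd; simpa using hd
  | cons pc rest ih =>
    intro d hd
    simp only [List.foldl_cons]
    refine ih _ ?_
    intro qc hqc
    rcases (PySem.Dict.mem_items_insert _ _ _ _).1 hqc with h | h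
    · subst h; exact PySem.Set.nodup_ofList _
    · exact hd _ h.1

lemma contains_eq_of_keys_eq {κ ν ν' : Type} [BEq κ] [LawfulBEq κ] [DecidableEq κ]
    (d : PySem.Dict κ ν) (d' : PySem.Dict κ ν') (h : d.keys = d'.keys) (k : κ) :
    d.contains k = d'.contains k := by
  rw [PySem.Dict.contains_eq_decide_mem_keys, PySem.Dict.contains_eq_decide_mem_keys, h]

-- inner chart loop: 'for m in cov: if m in chart: chart[m].add(p)'
lemma chartA_inner (p : String) (cov : List Int) (hc : cov.Nodup) :
    ∀ (ch : PySem.Dict Int (PySem.Set String)),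
      (cov.foldl (fun ch m => if ch.contains m then ch.modify m [] (fun s => PySem.Set.add s p) else ch) ch).keys = ch.keys ∧
      ∀ m, (cov.foldl (fun ch m => if ch.contains m then ch.modify m [] (fun s => PySem.Set.add s p) else ch) ch).getD m [] =
        if m ∈ cov ∧ ch.contains m = true then PySem.Set.add (ch.getD m []) p else ch.getD m [] := by
  induction cov with
  | nil => intro ch; simp
  | cons m' rest ih =>
    intro ch
    have hnd := List.nodup_cons.1 hc
    have ih' := ih hnd.2
    simp only [List.foldl_cons]
    by_cases hcm : ch.contains m' = true
    · have hkeys : (ch.modify m' [] (fun s => PySem.Set.add s p)).keys = ch.keys := by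
        rw [PySem.Dict.keys_modify, PySem.Dict.keys_insert_of_contains _ _ hcm]
      obtain ⟨ihk, ihv⟩ := ih' (ch.modify m' [] (fun s => PySem.Set.add s p))
      simp only [hcm, if_true]
      constructor
      · rw [ihk, hkeys]
      · intro m
        rw [ihv m]
        have hcont : (ch.modify m' [] (fun s => PySem.Set.add s p)).contains m = ch.contains m :=
          contains_eq_of_keys_eq _ _ hkeys m
        by_cases hmm : m = m'
        · subst hmm
          have : m ∉ rest := hnd.1
          simp [this, hcm]
        · rw [PySem.Dict.getD_modify]
          simp only [if_neg hmm, hcont]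
          by_cases hmr : m ∈ rest <;> simp [hmr, hmm]
    · obtain ⟨ihk, ihv⟩ := ih' ch
      rw [if_neg hcm]
      refine ⟨ihk, fun m => ?_⟩
      rw [ihv m]
      by_cases hmm : m = m'
      · subst hmm; simp [hcm]
      · by_cases hmr : m ∈ rest <;> simp [hmr, hmm]

-- the base chart {m: set() for m in minterms}
lemma chart_base_getD (ms : List Int) :
    ∀ (ch : PySem.Dict Int (PySem.Set String)) (m : Int),
      (∀ x, ch.getD x [] = []) →
      (ms.foldl (fun ch m => ch.insert m ([] : PySem.Set String)) ch).getD m [] = [] := by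
  induction ms with
  | nil => intro ch m h; simpa using h m
  | cons x rest ih =>
    intro ch m h
    simp only [List.foldl_cons]
    refine ih _ _ (fun y => ?_)
    rw [PySem.Dict.getD_insert]
    split <;> simp [h]

-- outer chart loop over primes.items()
lemma chartA_fold (l : List (String × List Int)) (hlk : (l.map (·.1)).Nodup)
    (hlv : ∀ pc ∈ l, pc.2.Nodup) :
    ∀ (ch : PySem.Dict Int (PySem.Set String)),
      (∀ m, ∀ q ∈ ch.getD m [], q ∉ l.map (·.1)) →
      (l.foldl (fun ch pc => pc.2.foldl
        (fun ch m => if ch.contains m then ch.modify m [] (fun s => PySem.Set.add s pc.1) else ch) ch) ch).keys = ch.keys ∧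
      ∀ m, (l.foldl (fun ch pc => pc.2.foldl
        (fun ch m => if ch.contains m then ch.modify m [] (fun s => PySem.Set.add s pc.1) else ch) ch) ch).getD m [] =
        if ch.contains m = true then ch.getD m [] ++ pvCovPrimesL l m else ch.getD m [] := by
  induction l with
  | nil => intro ch h; simp [pvCovPrimesL]
  | cons pc rest ih =>
    intro ch hfresh
    rw [List.map_cons] at hlk
    have hndk := List.nodup_cons.1 hlk
    obtain ⟨ik, iv⟩ := chartA_inner pc.1 pc.2 (hlv pc (by simp)) ch
    simp only [List.foldl_cons]
    set ch2 := pc.2.foldl (fun ch m => if ch.contains m then ch.modify m [] (fun s => PySem.Set.add s pc.1) else ch) ch with hch2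
    have hcont2 : ∀ m, ch2.contains m = ch.contains m := fun m => contains_eq_of_keys_eq _ _ ik m
    have hpre : ∀ m, ∀ q ∈ ch2.getD m [], q ∉ rest.map (·.1) := by
      intro m q hq
      rw [iv m] at hq
      by_cases hcm : m ∈ pc.2 ∧ ch.contains m = true
      · rw [if_pos hcm] at hq
        rcases (PySem.Set.mem_add _ _ _).1 hq with h | h
        · exact fun hr => hfresh m q h (by simp [hr])
        · subst h; exact fun hr => hndk.1 (by simpa using hr)
      · rw [if_neg hcm] at hq
        exact fun hr => hfresh m q hq (by simp [hr])
    obtain ⟨rk, rv⟩ := ih hndk.2 (fun qc hqc => hlv qc (by simp [hqc])) ch2 hpre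
    refine ⟨by rw [rk, ik], fun m => ?_⟩
    rw [rv m, iv m, hcont2 m]
    by_cases hcm : ch.contains m = true
    · simp only [hcm, if_true, and_true]
      by_cases hmem : m ∈ pc.2
      · have hadd : PySem.Set.add (ch.getD m []) pc.1 = ch.getD m [] ++ [pc.1] := by
          have : pc.1 ∉ ch.getD m [] := fun hq => hfresh m pc.1 hq (by simp)
          simp [PySem.Set.add, this]
        simp only [hmem, if_true, hadd]
        simp [pvCovPrimesL, hmem, List.append_assoc]
      · simp [hmem, pvCovPrimesL]
    · simp [hcm]

lemma chartA_spec (d : PySem.Dict String (List Int)) (ms : PySem.Set Int)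
    (hk : d.keys.Nodup) (hv : ∀ pc ∈ d.items, pc.2.Nodup) (hms : ms.Nodup) :
    (pvChartA d ms).keys = ms ∧
    ∀ m, (pvChartA d ms).getD m [] = if m ∈ ms then pvCovPrimes d m else [] := by
  unfold pvChartA
  set b0 := ms.foldl (fun ch m => ch.insert m ([] : PySem.Set String)) PySem.Dict.empty with hb0
  have hb0keys : b0.keys = ms := by
    rw [hb0, PySem.Dict.keys_foldl_insert ms (fun _ _ => ([] : PySem.Set String)) PySem.Dict.empty]
    show PySem.Set.update (List.map (fun x => x.1) PySem.Dict.empty.items) ms = ms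
    have : List.map (fun x : Int × PySem.Set String => x.1) PySem.Dict.empty.items = PySem.Set.empty := by
      simp [PySem.Dict.empty, PySem.Set.empty]
    rw [this, PySem.Set.update_empty, PySem.Set.ofList_eq_self_of_nodup ms hms]
  have hb0getD : ∀ m, b0.getD m [] = [] := fun m =>
    chart_base_getD ms PySem.Dict.empty m (fun x => by simp [PySem.Dict.getD_empty])
  have hb0cont : ∀ m, b0.contains m = decide (m ∈ ms) := by
    intro m; rw [PySem.Dict.contains_eq_decide_mem_keys, hb0keys]
  obtain ⟨k, v⟩ := chartA_fold d.items (by simpa [PySem.Dict.keys] using hk) hv b0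
    (fun m q hq => by simp [hb0getD m] at hq)
  refine ⟨by rw [k, hb0keys], fun m => ?_⟩
  rw [v m, hb0cont m, hb0getD m]
  by_cases hmem : m ∈ ms <;> simp [hmem, pvCovPrimes, pvCovPrimesL]

lemma covPrimesL_cons (pc : String × List Int) (rest : List (String × List Int)) (m : Int) :
    pvCovPrimesL (pc :: rest) m =
      if m ∈ pc.2 then pc.1 :: pvCovPrimesL rest m else pvCovPrimesL rest m := by
  simp only [pvCovPrimesL, List.filter_cons]
  by_cases h : m ∈ pc.2 <;> simp [h]

lemma cntB_inner (p : String) (ms : PySem.Set Int) (cov : List Int) (hc : cov.Nodup) :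
    ∀ (co : PySem.Dict Int Int × PySem.Dict Int String) (m : Int),
      ((cov.foldl (fun co m => if PySem.Set.contains ms m then
          (co.1.insert m (co.1.getD m 0 + 1), co.2.insert m p) else co) co).1.getD m 0 =
        if m ∈ cov ∧ m ∈ ms then co.1.getD m 0 + 1 else co.1.getD m 0) ∧
      ((cov.foldl (fun co m => if PySem.Set.contains ms m then
          (co.1.insert m (co.1.getD m 0 + 1), co.2.insert m p) else co) co).2.getD m "" =
        if m ∈ cov ∧ m ∈ ms then p else co.2.getD m "") := by
  induction cov with
  | nil => intro co m; simp
  | cons m' rest ih =>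
    intro co m
    have hnd := List.nodup_cons.1 hc
    simp only [List.foldl_cons]
    by_cases hms : m' ∈ ms
    · have hctrue : PySem.Set.contains ms m' = true := (PySem.Set.contains_iff _ _).2 hms
      simp only [hctrue, if_true]
      obtain ⟨ic, io⟩ := ih hnd.2 (co.1.insert m' (co.1.getD m' 0 + 1), co.2.insert m' p) m
      rw [ic, io]
      by_cases hmm : m = m'
      · subst hmm
        have : m ∉ rest := hnd.1
        simp [this, hms]
      · simp only [PySem.Dict.getD_insert, if_neg hmm]
        by_cases hmr : m ∈ rest <;> simp [hmr, hmm]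
    · have hcfalse : PySem.Set.contains ms m' = false := by
        rw [← Bool.not_eq_true]; exact fun h => hms ((PySem.Set.contains_iff _ _).1 h)
      simp only [hcfalse, Bool.false_eq_true, if_false]
      obtain ⟨ic, io⟩ := ih hnd.2 co m
      rw [ic, io]
      by_cases hmm : m = m'
      · subst hmm; simp [hms]
      · by_cases hmr : m ∈ rest <;> simp [hmr, hmm]

lemma cntB_fold (ms : PySem.Set Int) (l : List (String × List Int))
    (hlv : ∀ pc ∈ l, pc.2.Nodup) :
    ∀ (co : PySem.Dict Int Int × PySem.Dict Int String) (m : Int),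
      ((l.foldl (fun co pc => pc.2.foldl (fun co m => if PySem.Set.contains ms m then
          (co.1.insert m (co.1.getD m 0 + 1), co.2.insert m pc.1) else co) co) co).1.getD m 0 =
        co.1.getD m 0 + if m ∈ ms then ((pvCovPrimesL l m).length : Int) else 0) ∧
      ((l.foldl (fun co pc => pc.2.foldl (fun co m => if PySem.Set.contains ms m then
          (co.1.insert m (co.1.getD m 0 + 1), co.2.insert m pc.1) else co) co) co).2.getD m "" =
        if m ∈ ms then (pvCovPrimesL l m).getLastD (co.2.getD m "") else co.2.getD m "") := by
  induction l with
  | nil => intro co m; by_cases hms : m ∈ ms <;> simp [pvCovPrimesL, hms]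
  | cons pc rest ih =>
    intro co m
    simp only [List.foldl_cons]
    obtain ⟨ic, io⟩ := cntB_inner pc.1 ms pc.2 (hlv pc (by simp)) co m
    obtain ⟨rc, ro⟩ := ih (fun qc hqc => hlv qc (by simp [hqc])) _ m
    rw [rc, ro, ic, io, covPrimesL_cons]
    by_cases hms : m ∈ ms
    · by_cases hmem : m ∈ pc.2
      · simp only [hms, hmem, if_true, and_true, List.length_cons]
        refine ⟨by push_cast; ring, ?_⟩
        rw [List.getLastD_cons]
      · simp [hms, hmem]
    · simp [hms]

lemma indexB_inner (p : String) (cov0 : PySem.Set Int) (cov : List Int) (hc : cov.Nodup) :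
    ∀ (cpo : Int × PySem.Dict Int (List String)),
      ((cov.foldl (fun cpo m => if PySem.Set.contains cov0 m then cpo
          else (cpo.1 + 1, cpo.2.insert m (cpo.2.getD m [] ++ [p]))) cpo).1 =
        cpo.1 + ((cov.filter (fun m => !PySem.Set.contains cov0 m)).length : Int)) ∧
      ∀ m, (cov.foldl (fun cpo m => if PySem.Set.contains cov0 m then cpo
          else (cpo.1 + 1, cpo.2.insert m (cpo.2.getD m [] ++ [p]))) cpo).2.getD m [] =
        if m ∈ cov ∧ ¬ PySem.Set.contains cov0 m = true then cpo.2.getD m [] ++ [p]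
        else cpo.2.getD m [] := by
  induction cov with
  | nil => intro cpo; simp
  | cons m' rest ih =>
    intro cpo
    have hnd := List.nodup_cons.1 hc
    simp only [List.foldl_cons, List.filter_cons]
    by_cases hcv : PySem.Set.contains cov0 m' = true
    · simp only [hcv, if_true, Bool.not_true, Bool.false_eq_true, if_false]
      obtain ⟨ic, iv⟩ := ih hnd.2 cpo
      refine ⟨ic, fun m => ?_⟩
      rw [iv m]
      by_cases hmm : m = m'
      · subst hmm
        have hmc : m ∈ cov0 := (PySem.Set.contains_iff _ _).1 hcv
        simp [hnd.1, hmc]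
      · by_cases hmr : m ∈ rest <;> simp [hmr, hmm]
    · rw [Bool.not_eq_true] at hcv
      simp only [hcv, Bool.false_eq_true, if_false, Bool.not_false, if_true]
      obtain ⟨ic, iv⟩ := ih hnd.2 (cpo.1 + 1, cpo.2.insert m' (cpo.2.getD m' [] ++ [p]))
      refine ⟨by rw [ic]; simp only [List.length_cons]; push_cast; ring, fun m => ?_⟩
      rw [iv m]
      have hmc : m' ∉ cov0 := fun h => by
        rw [(PySem.Set.contains_iff _ _).2 h] at hcv; cases hcv
      by_cases hmm : m = m'
      · subst hmm
        simp [hnd.1, hmc]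
      · simp only [PySem.Dict.getD_insert, if_neg hmm]
        by_cases hmr : m ∈ rest <;> simp [hmr, hmm]

lemma indexB_fold (cov0 : PySem.Set Int) (l : List (String × List Int))
    (hlk : (l.map (·.1)).Nodup) (hlv : ∀ pc ∈ l, pc.2.Nodup) :
    ∀ (up : PySem.Dict String Int × PySem.Dict Int (List String)),
      (∀ pc ∈ l, up.1.contains pc.1 = false) →
      ((l.foldl (fun up pc =>
          (up.1.insert pc.1 (pc.2.foldl (fun cpo m => if PySem.Set.contains cov0 m then cpo
            else (cpo.1 + 1, cpo.2.insert m (cpo.2.getD m [] ++ [pc.1]))) ((0 : Int), up.2)).1,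
           (pc.2.foldl (fun cpo m => if PySem.Set.contains cov0 m then cpo
            else (cpo.1 + 1, cpo.2.insert m (cpo.2.getD m [] ++ [pc.1]))) ((0 : Int), up.2)).2)) up).1.items =
        up.1.items ++ l.map (fun pc => (pc.1, ((pc.2.filter (fun m => !PySem.Set.contains cov0 m)).length : Int)))) ∧
      ∀ m, ((l.foldl (fun up pc =>
          (up.1.insert pc.1 (pc.2.foldl (fun cpo m => if PySem.Set.contains cov0 m then cpo
            else (cpo.1 + 1, cpo.2.insert m (cpo.2.getD m [] ++ [pc.1]))) ((0 : Int), up.2)).1,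
           (pc.2.foldl (fun cpo m => if PySem.Set.contains cov0 m then cpo
            else (cpo.1 + 1, cpo.2.insert m (cpo.2.getD m [] ++ [pc.1]))) ((0 : Int), up.2)).2)) up).2.getD m [] =
        if PySem.Set.contains cov0 m = true then up.2.getD m []
        else up.2.getD m [] ++ pvCovPrimesL l m) := by
  induction l with
  | nil =>
    intro up _
    constructor
    · simp
    · intro m; by_cases hcv : PySem.Set.contains cov0 m = true <;> simp [pvCovPrimesL]
  | cons pc rest ih =>
    intro up hfresh
    rw [List.map_cons] at hlk
    have hndk := List.nodup_cons.1 hlk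
    simp only [List.foldl_cons]
    obtain ⟨ic, iv⟩ := indexB_inner pc.1 cov0 pc.2 (hlv pc (by simp)) ((0 : Int), up.2)
    set X := pc.2.foldl (fun cpo m => if PySem.Set.contains cov0 m then cpo
      else (cpo.1 + 1, cpo.2.insert m (cpo.2.getD m [] ++ [pc.1]))) ((0 : Int), up.2) with hX
    have hfresh2 : ∀ qc ∈ rest,
        ((up.1.insert pc.1 X.1, X.2) : PySem.Dict String Int × PySem.Dict Int (List String)).1.contains qc.1 = false := by
      intro qc hqc
      simp only [PySem.Dict.contains_insert]
      have h1 : up.1.contains qc.1 = false := hfresh qc (by simp [hqc])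
      have h2 : (qc.1 == pc.1) = false := by
        have : qc.1 ≠ pc.1 := by
          intro he
          exact hndk.1 (he ▸ List.mem_map_of_mem hqc)
        simpa using this
      simp [h1, h2]
    obtain ⟨rk, rv⟩ := ih hndk.2 (fun qc hqc => hlv qc (by simp [hqc])) (up.1.insert pc.1 X.1, X.2) hfresh2
    constructor
    · rw [rk]
      simp only [ic]
      rw [PySem.Dict.items_insert_of_not_contains _ _ (hfresh pc (by simp))]
      simp [List.append_assoc]
    · intro m
      rw [rv m, iv m, covPrimesL_cons]
      by_cases hcv : m ∈ cov0
      · have hb : PySem.Set.contains cov0 m = true := (PySem.Set.contains_iff _ _).2 hcv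
        simp [hcv]
      · have hb : PySem.Set.contains cov0 m = false := by
          rw [← Bool.not_eq_true]; exact fun h => hcv ((PySem.Set.contains_iff _ _).1 h)
        by_cases hmem : m ∈ pc.2
        · simp [hcv, hmem, List.append_assoc]
        · simp [hcv, hmem]

lemma set_add_of_mem {α : Type} [BEq α] [LawfulBEq α] (s : PySem.Set α) (x : α) (h : x ∈ s) :
    PySem.Set.add s x = s := by
  simp [PySem.Set.add, h]

lemma set_add_of_not_mem {α : Type} [BEq α] [LawfulBEq α] (s : PySem.Set α) (x : α) (h : x ∉ s) :
    PySem.Set.add s x = s ++ [x] := by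
  simp [PySem.Set.add, h]

lemma set_update_of_subset {α : Type} [BEq α] [LawfulBEq α] (s : PySem.Set α) (xs : List α)
    (h : ∀ x ∈ xs, x ∈ s) : PySem.Set.update s xs = s := by
  rw [PySem.Set.update_eq_append_filter]
  have : (PySem.Set.ofList xs).filter (fun y => !s.contains y) = [] := by
    rw [List.filter_eq_nil_iff]
    intro y hy
    have : y ∈ xs := by
      have := PySem.Set.mem_ofList (xs := xs) (y := y)
      exact (this.1 hy)
    simpa using h y this
  rw [this, List.append_nil]

lemma covPrimes_nodup (d : PySem.Dict String (List Int)) (hk : d.keys.Nodup) (m : Int) :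
    (pvCovPrimes d m).Nodup := by
  refine hk.sublist ?_
  unfold pvCovPrimes
  simpa [PySem.Dict.keys] using List.Sublist.map (Prod.fst) (List.filter_sublist (l := d.items))

lemma covPrimes_subset_keys (d : PySem.Dict String (List Int)) (m : Int) :
    ∀ q ∈ pvCovPrimes d m, q ∈ d.keys := by
  intro q hq
  unfold pvCovPrimes at hq
  obtain ⟨pc, hpc, rfl⟩ := List.mem_map.1 hq
  exact List.mem_map_of_mem (List.mem_of_mem_filter hpc)

lemma getD_nodup (d : PySem.Dict String (List Int)) (hk : d.keys.Nodup)
    (hv : ∀ pc ∈ d.items, pc.2.Nodup) (q : String) : (d.getD q []).Nodup := by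
  by_cases hq : q ∈ d.keys
  · obtain ⟨v, hpc⟩ : ∃ v, (q, v) ∈ d.items := by simpa [PySem.Dict.keys] using hq
    rw [PySem.Dict.getD_of_mem_items d hpc hk []]
    exact hv (q, v) hpc
  · rw [PySem.Dict.getD_of_not_contains]
    · exact List.nodup_nil
    · rw [PySem.Dict.contains_eq_decide_mem_keys]; simp [hq]

lemma getD_of_not_mem_keys (d : PySem.Dict String (List Int)) (q : String) (h : q ∉ d.keys) :
    d.getD q [] = [] := by
  rw [PySem.Dict.getD_of_not_contains]
  rw [PySem.Dict.contains_eq_decide_mem_keys]; simp [h]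

lemma mem_covPrimes (d : PySem.Dict String (List Int)) (hk : d.keys.Nodup) (m : Int) (q : String) :
    q ∈ pvCovPrimes d m ↔ m ∈ d.getD q [] := by
  constructor
  · intro hq
    obtain ⟨pc, hpc, rfl⟩ := List.mem_map.1 hq
    have h2 := List.of_mem_filter hpc
    have h1 := List.mem_of_mem_filter hpc
    rw [PySem.Dict.getD_of_mem_items (d := d) (k := pc.1) (v := pc.2) (by simpa using h1) hk []]
    simpa using h2
  · intro hm
    by_cases hq : q ∈ d.keys
    · obtain ⟨v, hpc⟩ : ∃ v, (q, v) ∈ d.items := by simpa [PySem.Dict.keys] using hq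
      have hget := PySem.Dict.getD_of_mem_items d hpc hk []
      refine List.mem_map.2 ⟨(q, v), List.mem_filter.2 ⟨hpc, ?_⟩, rfl⟩
      rw [hget] at hm
      simpa using hm
    · rw [getD_of_not_mem_keys d q hq] at hm
      simp at hm

lemma count_covPrimes (d : PySem.Dict String (List Int)) (hk : d.keys.Nodup) (m : Int) (q : String) :
    (pvCovPrimes d m).count q = if m ∈ d.getD q [] then 1 else 0 := by
  by_cases hq : q ∈ pvCovPrimes d m
  · rw [if_pos ((mem_covPrimes d hk m q).1 hq)]
    exact List.count_eq_one_of_mem (covPrimes_nodup d hk m) hq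
  · rw [if_neg (fun hm => hq ((mem_covPrimes d hk m q).2 hm))]
    exact List.count_eq_zero.2 hq

lemma contains_eq_decide_mem {α : Type} [BEq α] [LawfulBEq α] (s : PySem.Set α) (y : α) :
    PySem.Set.contains s y = decide (y ∈ s) := by
  by_cases h : y ∈ s
  · rw [(PySem.Set.contains_iff s y).2 h]; simp [h]
  · have : PySem.Set.contains s y = false := by
      rw [← Bool.not_eq_true]; exact fun hc => h ((PySem.Set.contains_iff s y).1 hc)
    rw [this]; simp [h]

lemma gain_snoc (cov : PySem.Set Int) (m : Int) (covq : List Int) (hnd : covq.Nodup)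
    (h : m ∉ cov) :
    pvGainA (cov ++ [m]) covq = pvGainA cov covq - (if m ∈ covq then 1 else 0) := by
  unfold pvGainA
  have hsplit : covq.filter (fun x => !PySem.Set.contains (cov ++ [m]) x) =
      (covq.filter (fun x => !PySem.Set.contains cov x)).filter (fun x => x != m) := by
    rw [List.filter_filter]
    refine List.filter_congr ?_
    intro x _
    have hb : ((x == m) : Bool) = decide (x = m) := by by_cases hx : x = m <;> simp [hx]
    simp [List.mem_append, Bool.and_comm, bne, hb]
  rw [hsplit]
  set l' := covq.filter (fun x => !PySem.Set.contains cov x) with hl'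
  have hndl' : l'.Nodup := hnd.filter _
  have hfe : l'.filter (fun x => x != m) = l'.erase m := (hndl'.erase_eq_filter m).symm
  rw [hfe]
  have hmem : m ∈ l' ↔ m ∈ covq := by
    rw [hl', List.mem_filter]
    simp [h]
  by_cases hm : m ∈ covq
  · rw [List.length_erase_of_mem (hmem.2 hm), if_pos hm]
    have hpos : 1 ≤ l'.length := List.length_pos_of_mem (hmem.2 hm)
    push_cast [Nat.cast_sub hpos]
    ring
  · rw [List.erase_of_not_mem (fun hc => hm (hmem.1 hc)), if_neg hm]
    ring

lemma getD_foldl_modify_sub (ps : List String) :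
    ∀ (u : PySem.Dict String Int) (x : String),
      (ps.foldl (fun u q => u.modify q 0 (fun g => g - 1)) u).getD x 0 =
        u.getD x 0 - (ps.count x : Int) := by
  induction ps with
  | nil => intro u x; simp
  | cons q rest ih =>
    intro u x
    simp only [List.foldl_cons]
    rw [ih]
    rw [PySem.Dict.getD_modify]
    by_cases hxq : x = q
    · subst hxq; simp; ring
    · have : (q == x) = false := by simpa using (Ne.symm hxq)
      simp [hxq, List.count_cons, this]

lemma keys_foldl_modify_sub (ps : List String) (u : PySem.Dict String Int)
    (h : ∀ x ∈ ps, x ∈ u.keys) :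
    (ps.foldl (fun u q => u.modify q 0 (fun g => g - 1)) u).keys = u.keys := by
  rw [PySem.Dict.keys_foldl_modify ps 0 (fun _ _ v => v - 1) u]
  exact set_update_of_subset _ _ h

lemma bestScan_eq (d : PySem.Dict String (List Int)) (hk : d.keys.Nodup)
    (sel : List String) (cov : PySem.Set Int) (u : PySem.Dict String Int)
    (hkeys : u.keys = d.keys)
    (hval : ∀ q, u.getD q 0 = pvGainA cov (d.getD q [])) :
    pvBestScanB u.items sel = pvBestScanA d.items sel cov := by
  unfold pvBestScanA pvBestScanB
  rw [PySem.Dict.items_eq_map_keys u (hkeys ▸ hk) 0,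
      PySem.Dict.items_eq_map_keys d hk [], hkeys]
  rw [List.foldl_map, List.foldl_map]
  refine PySem.List.foldl_congr_mem _ _ _ _ ?_
  intro st q _
  simp [PySem.Set.contains_eq_listContains, hval q]

lemma coverB_spec (d : PySem.Dict String (List Int)) (hk : d.keys.Nodup)
    (hv : ∀ pc ∈ d.items, pc.2.Nodup) (po : PySem.Dict Int (List String))
    (cov0 : PySem.Set Int)
    (hpo : ∀ m : Int, m ∉ cov0 → po.getD m [] = pvCovPrimes d m)
    (covp : List Int) :
    ∀ (cov : PySem.Set Int) (u : PySem.Dict String Int),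
      (∀ x, x ∈ cov0 → x ∈ cov) →
      u.keys = d.keys →
      (∀ q, u.getD q 0 = pvGainA cov (d.getD q [])) →
      (pvCoverB po covp (cov, u)).1 = PySem.Set.update cov covp ∧
      (pvCoverB po covp (cov, u)).2.keys = d.keys ∧
      (∀ q, (pvCoverB po covp (cov, u)).2.getD q 0 =
        pvGainA (PySem.Set.update cov covp) (d.getD q [])) := by
  induction covp with
  | nil =>
    intro cov u _ hkeys hval
    refine ⟨by simp [pvCoverB, PySem.Set.update], hkeys, fun q => by
      simpa [pvCoverB, PySem.Set.update] using hval q⟩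
  | cons m rest ih =>
    intro cov u hsub hkeys hval
    have hstep : PySem.Set.update cov (m :: rest) = PySem.Set.update (PySem.Set.add cov m) rest :=
      PySem.Set.update_cons cov m rest
    by_cases hmc : m ∈ cov
    · have hb : PySem.Set.contains cov m = true := (PySem.Set.contains_iff _ _).2 hmc
      have : pvCoverB po (m :: rest) (cov, u) = pvCoverB po rest (cov, u) := by
        simp [pvCoverB, hmc]
      rw [this, hstep, set_add_of_mem cov m hmc]
      exact ih cov u hsub hkeys hval
    · have hb : PySem.Set.contains cov m = false := by
        rw [← Bool.not_eq_true]; exact fun hc => hmc ((PySem.Set.contains_iff _ _).1 hc)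
      have hm0 : m ∉ cov0 := fun hc => hmc (hsub m hc)
      set u' := (po.getD m []).foldl (fun u q => u.modify q 0 (fun g => g - 1)) u with hu'
      have hred : pvCoverB po (m :: rest) (cov, u) = pvCoverB po rest (PySem.Set.add cov m, u') := by
        simp [pvCoverB, hmc, hu']
      rw [hred, hstep]
      have hadd : PySem.Set.add cov m = cov ++ [m] := set_add_of_not_mem cov m hmc
      have hkeys' : u'.keys = d.keys := by
        rw [hu', hpo m hm0, keys_foldl_modify_sub _ _ ?_, hkeys]
        intro x hx
        rw [hkeys]
        exact covPrimes_subset_keys d m x hx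
      have hval' : ∀ q, u'.getD q 0 = pvGainA (PySem.Set.add cov m) (d.getD q []) := by
        intro q
        rw [hu', hpo m hm0, getD_foldl_modify_sub, hval q, count_covPrimes d hk m q, hadd,
          gain_snoc cov m (d.getD q []) (getD_nodup d hk hv q) hmc]
        by_cases hmm : m ∈ d.getD q [] <;> simp [hmm]
      exact ih (PySem.Set.add cov m) u'
        (fun x hx => by rw [hadd]; exact List.mem_append_left _ (hsub x hx)) hkeys' hval'

lemma bestScanA_not_mem (items : List (String × List Int)) (sel : List String)
    (cov : PySem.Set Int) (p : String) :
    (pvBestScanA items sel cov).1 = some p → p ∉ sel := by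
  unfold pvBestScanA
  suffices h : ∀ (l : List (String × List Int)) (st : Option String × Int),
      (st.1 = some p → p ∉ sel) → ((l.foldl (fun st pc =>
        if sel.contains pc.1 then st
        else
          let gain := pvGainA cov pc.2
          if gain > st.2 then (some pc.1, gain) else st) st).1 = some p → p ∉ sel) by
    exact h items (none, -1) (by simp)
  intro l
  induction l with
  | nil => intro st hst; exact hst
  | cons pc rest ih =>
    intro st hst
    simp only [List.foldl_cons]
    refine ih _ ?_
    by_cases hc : pc.1 ∈ sel
    · simpa [hc] using hst
    · by_cases hg : st.2 < pvGainA cov pc.2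
      · intro he
        have : pc.1 = p := by simpa [hc, hg] using he
        subst this
        exact hc
      · simpa [hc, hg] using hst

lemma greedy_eq (d : PySem.Dict String (List Int)) (hk : d.keys.Nodup)
    (hv : ∀ pc ∈ d.items, pc.2.Nodup) (ms : PySem.Set Int)
    (po : PySem.Dict Int (List String)) (cov0 : PySem.Set Int)
    (hpo : ∀ m : Int, m ∉ cov0 → po.getD m [] = pvCovPrimes d m) :
    ∀ (fuel : Nat) (sel : List String) (cov : PySem.Set Int) (u : PySem.Dict String Int),
      (∀ x, x ∈ cov0 → x ∈ cov) →
      u.keys = d.keys →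
      (∀ q, u.getD q 0 = pvGainA cov (d.getD q [])) →
      pvGreedyB d ms po fuel (sel, sel, cov, u) = pvGreedyA d ms fuel (sel, cov) := by
  intro fuel
  induction fuel with
  | zero => intro sel cov u _ _ _; rfl
  | succ n ih =>
    intro sel cov u hsub hkeys hval
    show pvGreedyB d ms po (n + 1) (sel, sel, cov, u) = pvGreedyA d ms (n + 1) (sel, cov)
    rw [pvGreedyB, pvGreedyA]
    simp only
    by_cases heq : PySem.Set.equal cov ms = true
    · simp [heq]
    · rw [Bool.not_eq_true] at heq
      simp only [heq, Bool.false_eq_true, if_false]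
      rw [bestScan_eq d hk sel cov u hkeys hval]
      cases hb : (pvBestScanA d.items sel cov).1 with
      | none => simp
      | some p =>
        simp only
        by_cases hg : (pvBestScanA d.items sel cov).2 ≤ 0
        · simp [hg]
        · simp only [hg, if_false]
          have hnp : p ∉ sel := bestScanA_not_mem d.items sel cov p hb
          obtain ⟨hc1, hc2, hc3⟩ := coverB_spec d hk hv po cov0 hpo (d.getD p [])
            cov u hsub hkeys hval
          have hadd : PySem.Set.add sel p = sel ++ [p] := set_add_of_not_mem sel p hnp
          rw [show (pvCoverB po (d.getD p []) (cov, u)).1 = PySem.Set.update cov (d.getD p []) from hc1] at *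
          rw [hadd]
          exact ih (sel ++ [p]) (PySem.Set.update cov (d.getD p [])) (pvCoverB po (d.getD p []) (cov, u)).2
            (fun x hx => (PySem.Set.mem_update _ _ _).2 (Or.inl (hsub x hx))) hc2 (hc1 ▸ hc3)

-- ===== phase 1 =====

lemma essListA (d : PySem.Dict String (List Int)) (ms : PySem.Set Int)
    (hk : d.keys.Nodup) (hv : ∀ pc ∈ d.items, pc.2.Nodup) (hms : ms.Nodup)
    (cov : PySem.Set Int) :
    ((pvChartA d ms).items.filter
      (fun mp => !(PySem.Set.contains cov mp.1) && mp.2.length == 1)).map (·.1) =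
      ms.filter (fun m => !(PySem.Set.contains cov m) && ((pvCovPrimes d m).length == 1)) := by
  obtain ⟨hkeys, hval⟩ := chartA_spec d ms hk hv hms
  have hnd : (pvChartA d ms).keys.Nodup := by rw [hkeys]; exact hms
  rw [PySem.Dict.items_eq_map_keys _ hnd [], hkeys, List.filter_map, List.map_map]
  have : ∀ m ∈ ms, ((fun mp : Int × PySem.Set String => !(PySem.Set.contains cov mp.1) && mp.2.length == 1) ∘
      (fun m => (m, (pvChartA d ms).getD m []))) m =
      (fun m => !(PySem.Set.contains cov m) && ((pvCovPrimes d m).length == 1)) m := by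
    intro m hm
    simp only [Function.comp_apply, hval m, if_pos hm]
  rw [List.filter_congr this]
  rw [show (((fun x => x.1) : Int × PySem.Set String → Int) ∘
      fun k => (k, (pvChartA d ms).getD k [])) = id from rfl, List.map_id]

lemma essFoldA_mono (chart : PySem.Dict Int (PySem.Set String)) (d : PySem.Dict String (List Int)) :
    ∀ (E : List Int) (st : List String × PySem.Set Int) (x : Int),
      x ∈ st.2 → x ∈ (E.foldl (pvEssStepA chart d) st).2 := by
  intro E
  induction E with
  | nil => intro st x hx; exact hx
  | cons m rest ih =>
    intro st x hx
    simp only [List.foldl_cons]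
    exact ih _ x ((PySem.Set.mem_update _ _ _).2 (Or.inl hx))

lemma essFoldA_covers (d : PySem.Dict String (List Int)) (ms : PySem.Set Int)
    (hk : d.keys.Nodup) (hv : ∀ pc ∈ d.items, pc.2.Nodup) (hms : ms.Nodup) :
    ∀ (E : List Int), (∀ m ∈ E, m ∈ ms ∧ (pvCovPrimes d m).length = 1) →
      ∀ (st : List String × PySem.Set Int) (m : Int), m ∈ E →
        m ∈ (E.foldl (pvEssStepA (pvChartA d ms) d) st).2 := by
  obtain ⟨hkeys, hval⟩ := chartA_spec d ms hk hv hms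
  intro E
  induction E with
  | nil => intro _ st m hm; cases hm
  | cons m' rest ih =>
    intro hE st m hm
    simp only [List.foldl_cons]
    rcases List.mem_cons.1 hm with rfl | hmr
    · -- m is processed now: it lands in covered, and stays
      refine essFoldA_mono _ _ rest _ m ?_
      obtain ⟨hmms, hlen⟩ := hE m (by simp)
      obtain ⟨p, hp⟩ := List.length_eq_one_iff.1 hlen
      have hchart : (pvChartA d ms).getD m [] = pvCovPrimes d m := by rw [hval m, if_pos hmms]
      have hpm : m ∈ d.getD p [] := (mem_covPrimes d hk m p).1 (by rw [hp]; simp)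
      show m ∈ (pvEssStepA (pvChartA d ms) d st m).2
      unfold pvEssStepA
      rw [hchart, hp]
      exact (PySem.Set.mem_update _ _ _).2 (Or.inr (by simpa using hpm))
    · exact ih (fun x hx => hE x (by simp [hx])) _ m hmr

lemma essFold_eq (d : PySem.Dict String (List Int)) (ms : PySem.Set Int)
    (hk : d.keys.Nodup) (hv : ∀ pc ∈ d.items, pc.2.Nodup) (hms : ms.Nodup)
    (owner : PySem.Dict Int String)
    (howner : ∀ m ∈ ms, owner.getD m "" = (pvCovPrimes d m).getLastD "") :
    ∀ (E : List Int), (∀ m ∈ E, m ∈ ms ∧ (pvCovPrimes d m).length = 1) →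
      ∀ (sel : List String) (cov : PySem.Set Int),
        (E.foldl (fun st m =>
          let p := owner.getD m ""
          let sl := if PySem.Set.contains st.2.1 p then (st.1, st.2.1)
                    else (st.1 ++ [p], PySem.Set.add st.2.1 p)
          (sl.1, sl.2, PySem.Set.update st.2.2 (d.getD p [])))
          ((sel, sel, cov) : List String × PySem.Set String × PySem.Set Int)) =
        ((E.foldl (pvEssStepA (pvChartA d ms) d) (sel, cov)).1,
         (E.foldl (pvEssStepA (pvChartA d ms) d) (sel, cov)).1,
         (E.foldl (pvEssStepA (pvChartA d ms) d) (sel, cov)).2) := by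
  obtain ⟨hkeys, hval⟩ := chartA_spec d ms hk hv hms
  intro E
  induction E with
  | nil => intro _ sel cov; rfl
  | cons m rest ih =>
    intro hE sel cov
    obtain ⟨hmms, hlen⟩ := hE m (by simp)
    obtain ⟨p, hp⟩ := List.length_eq_one_iff.1 hlen
    have hpeq : owner.getD m "" = ((pvChartA d ms).getD m []).headD "" := by
      rw [howner m hmms, hval m, if_pos hmms, hp]
      rfl
    simp only [List.foldl_cons]
    have hstep : pvEssStepA (pvChartA d ms) d (sel, cov) m =
        ((if sel.contains (owner.getD m "") then sel else sel ++ [owner.getD m ""]),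
          PySem.Set.update cov (d.getD (owner.getD m "") [])) := by
      unfold pvEssStepA
      rw [← hpeq]
    rw [hstep]
    by_cases hc : owner.getD m "" ∈ sel
    · have hb : sel.contains (owner.getD m "") = true := by simpa [List.contains_iff_mem] using hc
      have hbs : PySem.Set.contains sel (owner.getD m "") = true := (PySem.Set.contains_iff _ _).2 hc
      simp only [hb, hbs, if_true]
      exact ih (fun x hx => hE x (by simp [hx])) sel _
    · have hb : sel.contains (owner.getD m "") = false := by
        rw [← Bool.not_eq_true]; intro hcc; exact hc (by simpa [List.contains_iff_mem] using hcc)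
      have hbs : PySem.Set.contains sel (owner.getD m "") = false := by
        rw [← Bool.not_eq_true]; exact fun hcc => hc ((PySem.Set.contains_iff _ _).1 hcc)
      have hadd : PySem.Set.add sel (owner.getD m "") = sel ++ [owner.getD m ""] :=
        set_add_of_not_mem _ _ hc
      simp only [hb, hbs, Bool.false_eq_true, if_false, hadd]
      exact ih (fun x hx => hE x (by simp [hx])) (sel ++ [owner.getD m ""]) _

lemma essLoopA_eq (d : PySem.Dict String (List Int)) (ms : PySem.Set Int)
    (hk : d.keys.Nodup) (hv : ∀ pc ∈ d.items, pc.2.Nodup) (hms : ms.Nodup) :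
    pvEssLoopA (pvChartA d ms) d (ms.length + 2) ([], []) =
      (ms.filter (fun m => (pvCovPrimes d m).length == 1)).foldl
        (pvEssStepA (pvChartA d ms) d) ([], []) := by
  set E := ms.filter (fun m => (pvCovPrimes d m).length == 1) with hE
  have hE1 : ((pvChartA d ms).items.filter
      (fun mp => !(PySem.Set.contains ([] : PySem.Set Int) mp.1) && mp.2.length == 1)).map (·.1) = E := by
    rw [essListA d ms hk hv hms]
    refine List.filter_congr ?_
    intro m _
    simp [PySem.Set.contains]
  have hEmem : ∀ m ∈ E, m ∈ ms ∧ (pvCovPrimes d m).length = 1 := by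
    intro m hm
    have := List.mem_filter.1 hm
    exact ⟨this.1, by simpa using this.2⟩
  show pvEssLoopA (pvChartA d ms) d (ms.length + 1 + 1) ([], []) = _
  rw [pvEssLoopA]
  simp only [hE1]
  by_cases hEnil : E.isEmpty
  · rw [if_pos hEnil]
    rw [List.isEmpty_iff.1 hEnil]
    rfl
  · rw [if_neg hEnil]
    show pvEssLoopA (pvChartA d ms) d (ms.length + 1) _ = _
    have hlen : ms.length + 1 = ms.length + 1 := rfl
    rw [pvEssLoopA]
    set st1 := E.foldl (pvEssStepA (pvChartA d ms) d) ([], []) with hst1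
    have hE2 : ((pvChartA d ms).items.filter
        (fun mp => !(PySem.Set.contains st1.2 mp.1) && mp.2.length == 1)).map (·.1) = [] := by
      rw [essListA d ms hk hv hms]
      rw [List.filter_eq_nil_iff]
      intro m hm
      by_cases hlen1 : (pvCovPrimes d m).length = 1
      · have hmE : m ∈ E := List.mem_filter.2 ⟨hm, by simpa using hlen1⟩
        have hcov : m ∈ st1.2 := essFoldA_covers d ms hk hv hms E hEmem ([], []) m hmE
        simp only [Bool.and_eq_true, Bool.not_eq_true', not_and]
        intro hns
        rw [contains_eq_decide_mem] at hns
        simp [hcov] at hns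
      · simp [hlen1]
    simp only [hE2]
    rfl

lemma essB_eq (d : PySem.Dict String (List Int)) (ms : PySem.Set Int)
    (hk : d.keys.Nodup) (hv : ∀ pc ∈ d.items, pc.2.Nodup) (hms : ms.Nodup)
    (cnt : PySem.Dict Int Int) (owner : PySem.Dict Int String)
    (hcnt : ∀ m ∈ ms, cnt.getD m 0 = ((pvCovPrimes d m).length : Int))
    (howner : ∀ m ∈ ms, owner.getD m "" = (pvCovPrimes d m).getLastD "") :
    pvEssB d ms cnt owner =
      (((ms.filter (fun m => (pvCovPrimes d m).length == 1)).foldl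
          (pvEssStepA (pvChartA d ms) d) ([], [])).1,
       ((ms.filter (fun m => (pvCovPrimes d m).length == 1)).foldl
          (pvEssStepA (pvChartA d ms) d) ([], [])).1,
       ((ms.filter (fun m => (pvCovPrimes d m).length == 1)).foldl
          (pvEssStepA (pvChartA d ms) d) ([], [])).2) := by
  unfold pvEssB
  rw [PySem.List.foldl_if_eq_foldl_filter (fun m => cnt.getD m 0 == 1)]
  have hfc : ms.filter (fun m => cnt.getD m 0 == 1) =
      ms.filter (fun m => (pvCovPrimes d m).length == 1) := by
    refine List.filter_congr ?_
    intro m hm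
    rw [hcnt m hm]
    by_cases hl : (pvCovPrimes d m).length = 1
    · simp [hl]
    · have : ((pvCovPrimes d m).length : Int) ≠ 1 := by exact_mod_cast hl
      simp [hl, this]
  rw [hfc]
  refine essFold_eq d ms hk hv hms owner howner _ ?_ [] []
  intro m hm
  have := List.mem_filter.1 hm
  exact ⟨this.1, by simpa using this.2⟩

lemma main_eq (primes : List (String × List Int)) (minterms : List Int) :
    select_implicants_cover_py primes minterms = select_implicants_cover_py_alt primes minterms := by
  have hk := pvDictOf_keys_nodup primes
  have hv := pvDictOf_values_nodup primes
  have hms : (PySem.Set.ofList minterms).Nodup := PySem.Set.nodup_ofList minterms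
  set d := pvDictOf primes with hd
  set ms := PySem.Set.ofList minterms with hmsdef
  set a := (ms.filter (fun m => (pvCovPrimes d m).length == 1)).foldl
      (pvEssStepA (pvChartA d ms) d) ([], []) with ha
  -- cnt / owner values
  have hcnt : ∀ m ∈ ms, (pvCntOwnerB d ms).1.getD m 0 = ((pvCovPrimes d m).length : Int) := by
    intro m hm
    rw [show pvCntOwnerB d ms = d.items.foldl (fun co pc => pc.2.foldl
        (fun co m => if PySem.Set.contains ms m then
          (co.1.insert m (co.1.getD m 0 + 1), co.2.insert m pc.1) else co) co)
        (PySem.Dict.empty, PySem.Dict.empty) from rfl]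
    rw [(cntB_fold ms d.items hv (PySem.Dict.empty, PySem.Dict.empty) m).1]
    simp [hm, pvCovPrimes, pvCovPrimesL]
  have howner : ∀ m ∈ ms, (pvCntOwnerB d ms).2.getD m "" = (pvCovPrimes d m).getLastD "" := by
    intro m hm
    rw [show pvCntOwnerB d ms = d.items.foldl (fun co pc => pc.2.foldl
        (fun co m => if PySem.Set.contains ms m then
          (co.1.insert m (co.1.getD m 0 + 1), co.2.insert m pc.1) else co) co)
        (PySem.Dict.empty, PySem.Dict.empty) from rfl]
    rw [(cntB_fold ms d.items hv (PySem.Dict.empty, PySem.Dict.empty) m).2]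
    simp [hm, pvCovPrimes, pvCovPrimesL]
  -- index characterization
  have hfresh : ∀ pc ∈ d.items,
      (PySem.Dict.empty : PySem.Dict String Int).contains pc.1 = false := by
    intro pc _; simp [PySem.Dict.contains_empty]
  obtain ⟨hui, hpo'⟩ := indexB_fold a.2 d.items (by simpa [PySem.Dict.keys] using hk) hv
    (PySem.Dict.empty, PySem.Dict.empty) hfresh
  have hIdx : pvIndexB d a.2 = d.items.foldl (fun up pc =>
      (up.1.insert pc.1 (pc.2.foldl (fun cpo m => if PySem.Set.contains a.2 m then cpo
        else (cpo.1 + 1, cpo.2.insert m (cpo.2.getD m [] ++ [pc.1]))) ((0 : Int), up.2)).1,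
       (pc.2.foldl (fun cpo m => if PySem.Set.contains a.2 m then cpo
        else (cpo.1 + 1, cpo.2.insert m (cpo.2.getD m [] ++ [pc.1]))) ((0 : Int), up.2)).2))
      (PySem.Dict.empty, PySem.Dict.empty) := rfl
  have huitems : (pvIndexB d a.2).1.items =
      d.items.map (fun pc => (pc.1, pvGainA a.2 pc.2)) := by
    rw [hIdx, hui]
    simp [PySem.Dict.empty, pvGainA]
  have hukeys : (pvIndexB d a.2).1.keys = d.keys := by
    show (pvIndexB d a.2).1.items.map (·.1) = d.items.map (·.1)
    rw [huitems, List.map_map]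
    rfl
  have hund : (pvIndexB d a.2).1.keys.Nodup := by rw [hukeys]; exact hk
  have huval : ∀ q, (pvIndexB d a.2).1.getD q 0 = pvGainA a.2 (d.getD q []) := by
    intro q
    by_cases hq : q ∈ d.keys
    · obtain ⟨v, hpc⟩ : ∃ v, (q, v) ∈ d.items := by simpa [PySem.Dict.keys] using hq
      have hmem2 : (q, pvGainA a.2 v) ∈ (pvIndexB d a.2).1.items := by
        rw [huitems]
        exact List.mem_map_of_mem hpc
      rw [PySem.Dict.getD_of_mem_items _ hmem2 hund 0,
          PySem.Dict.getD_of_mem_items d hpc hk []]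
    · have hc : (pvIndexB d a.2).1.contains q = false := by
        rw [PySem.Dict.contains_eq_decide_mem_keys, hukeys]; simp [hq]
      rw [PySem.Dict.getD_of_not_contains _ _ hc, getD_of_not_mem_keys d q hq]
      simp [pvGainA]
  have hupo : ∀ m : Int, m ∉ a.2 → (pvIndexB d a.2).2.getD m [] = pvCovPrimes d m := by
    intro m hm
    have hb : PySem.Set.contains a.2 m = true → False := fun hc => hm ((PySem.Set.contains_iff _ _).1 hc)
    rw [show (pvIndexB d a.2).2 = (d.items.foldl (fun up pc =>
        (up.1.insert pc.1 (pc.2.foldl (fun cpo m => if PySem.Set.contains a.2 m then cpo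
          else (cpo.1 + 1, cpo.2.insert m (cpo.2.getD m [] ++ [pc.1]))) ((0 : Int), up.2)).1,
         (pc.2.foldl (fun cpo m => if PySem.Set.contains a.2 m then cpo
          else (cpo.1 + 1, cpo.2.insert m (cpo.2.getD m [] ++ [pc.1]))) ((0 : Int), up.2)).2))
        (PySem.Dict.empty, PySem.Dict.empty)).2 from congrArg Prod.snd hIdx]
    rw [hpo' m]
    have hbf : PySem.Set.contains a.2 m = false := by
      rw [← Bool.not_eq_true]; exact hb
    rw [hbf]
    simp [PySem.Dict.getD_empty, pvCovPrimes, pvCovPrimesL]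
  -- assemble
  rw [show select_implicants_cover_py primes minterms = pvGreedyA d ms (d.items.length + 1)
      (pvEssLoopA (pvChartA d ms) d (ms.length + 2) ([], [])) from rfl]
  rw [essLoopA_eq d ms hk hv hms, ← ha]
  rw [show select_implicants_cover_py_alt primes minterms = pvGreedyB d ms (pvIndexB d
      (pvEssB d ms (pvCntOwnerB d ms).1 (pvCntOwnerB d ms).2).2.2).2 (d.items.length + 1)
      ((pvEssB d ms (pvCntOwnerB d ms).1 (pvCntOwnerB d ms).2).1,
       (pvEssB d ms (pvCntOwnerB d ms).1 (pvCntOwnerB d ms).2).2.1,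
       (pvEssB d ms (pvCntOwnerB d ms).1 (pvCntOwnerB d ms).2).2.2,
       (pvIndexB d (pvEssB d ms (pvCntOwnerB d ms).1 (pvCntOwnerB d ms).2).2.2).1) from rfl]
  rw [essB_eq d ms hk hv hms (pvCntOwnerB d ms).1 (pvCntOwnerB d ms).2 hcnt howner, ← ha]
  exact (greedy_eq d hk hv ms (pvIndexB d a.2).2 a.2 hupo (d.items.length + 1)
    a.1 a.2 (pvIndexB d a.2).1 (fun x hx => hx) hukeys huval).symm

-- ===== VERDICT (by name: the statement is the Claim_ definition above) =====
theorem select_implicants_cover_py_spec : Claim_equal_select_implicants_cover_py := by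
  intro primes minterms _
  unfold Spec_select_implicants_cover_py
  exact main_eq primes minterms
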